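-- pv_equiv track=rewrite | github.com/chrispyspearbit/ChrisGoesGolfing | train.py | token_chunks
-- ===== SOURCE A (Python) =====
-- def token_chunks(total_tokens, seq_len, max_chunk_tokens):
--     usable_total = (total_tokens // seq_len) * seq_len
--     if usable_total <= 0:
--         raise ValueError(f"token budget too small for seq_len={seq_len}")
--     usable_chunk = max((max_chunk_tokens // seq_len) * seq_len, seq_len)
--     chunks = []
--     remaining = usable_total
--     while remaining > 0:
--         chunk = min(remaining, usable_chunk)
--         chunks.append(chunk)
--         remaining -= chunk
--     return chunks
-- ===== SOURCE B (Python) =====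
-- def token_chunks(total_tokens, seq_len, max_chunk_tokens):
--     usable_total = (total_tokens // seq_len) * seq_len
--     if usable_total <= 0:
--         raise ValueError(f"token budget too small for seq_len={seq_len}")
--     usable_chunk = max((max_chunk_tokens // seq_len) * seq_len, seq_len)
--     full, rem = divmod(usable_total, usable_chunk)
--     chunks = [usable_chunk] * full
--     if rem:
--         chunks.append(rem)
--     return chunks
-- ===== Notes on version B (the rewrite author's own statement) =====
-- stated objective: simpler
-- what changed: replaces the subtract-and-append while loop by a single divmod: full copies of usable_chunk plus the remainder chunk when nonzero
import Mathlib
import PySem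

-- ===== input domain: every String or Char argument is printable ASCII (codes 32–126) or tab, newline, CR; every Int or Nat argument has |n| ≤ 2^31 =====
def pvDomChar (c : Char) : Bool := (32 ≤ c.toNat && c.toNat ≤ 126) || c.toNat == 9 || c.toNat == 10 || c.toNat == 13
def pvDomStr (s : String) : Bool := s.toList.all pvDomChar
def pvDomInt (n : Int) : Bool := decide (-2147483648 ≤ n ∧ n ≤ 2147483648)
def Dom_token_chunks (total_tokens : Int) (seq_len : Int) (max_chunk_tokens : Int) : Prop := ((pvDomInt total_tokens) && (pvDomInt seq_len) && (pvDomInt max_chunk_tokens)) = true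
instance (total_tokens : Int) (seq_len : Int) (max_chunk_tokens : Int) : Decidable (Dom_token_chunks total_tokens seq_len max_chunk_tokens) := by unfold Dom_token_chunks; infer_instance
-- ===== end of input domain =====

-- B replaces A's subtract-and-append while loop by one divmod (full copies of
-- usable_chunk plus the remainder when nonzero); equality of RETURN values is
-- proved on Pre_ (exactly the inputs where A returns normally).

-- ===== PORT A =====
-- the while loop; the '0 < min r uc' conjunct is a totality guard only: when it
-- fails with 0 < r the Python loop never terminates (excluded by Pre_)
def tcLoop (uc : Int) (r : Int) (acc : List Int) : List Int :=
  if _h : 0 < r ∧ 0 < min r uc then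
    tcLoop uc (r - min r uc) (acc ++ [min r uc])
  else acc
termination_by r.toNat
decreasing_by
  have _h1 : min r uc ≤ r := min_le_left r uc
  omega

def token_chunks (total_tokens : Int) (seq_len : Int) (max_chunk_tokens : Int) : List Int :=
  let usable_total := (PySem.Int.floordiv total_tokens seq_len) * seq_len
  if usable_total ≤ 0 then []   -- Python raises ValueError here (outside Pre_)
  else
    let usable_chunk := max ((PySem.Int.floordiv max_chunk_tokens seq_len) * seq_len) seq_len
    tcLoop usable_chunk usable_total []

-- ===== PORT B =====
def token_chunks_alt (total_tokens : Int) (seq_len : Int) (max_chunk_tokens : Int) : List Int :=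
  let usable_total := (PySem.Int.floordiv total_tokens seq_len) * seq_len
  if usable_total ≤ 0 then []   -- Python raises ValueError here (outside Pre_)
  else
    let usable_chunk := max ((PySem.Int.floordiv max_chunk_tokens seq_len) * seq_len) seq_len
    let full := PySem.Int.floordiv usable_total usable_chunk
    let rem := PySem.Int.mod usable_total usable_chunk
    List.replicate full.toNat usable_chunk ++ (if rem ≠ 0 then [rem] else [])

-- ===== PRECONDITION & SPEC =====
-- Pre_ is exactly where Python A returns: seq_len = 0 raises ZeroDivisionError,
-- usable_total ≤ 0 raises ValueError, and usable_chunk ≤ 0 makes A's loop diverge.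
def Pre_token_chunks (total_tokens : Int) (seq_len : Int) (max_chunk_tokens : Int) : Prop :=
  seq_len ≠ 0 ∧
  0 < (PySem.Int.floordiv total_tokens seq_len) * seq_len ∧
  0 < max ((PySem.Int.floordiv max_chunk_tokens seq_len) * seq_len) seq_len
instance (total_tokens : Int) (seq_len : Int) (max_chunk_tokens : Int) : Decidable (Pre_token_chunks total_tokens seq_len max_chunk_tokens) := by unfold Pre_token_chunks; infer_instance

def pvWitness_token_chunks : Int × Int × Int := (10, 3, 7)

def Spec_token_chunks (total_tokens : Int) (seq_len : Int) (max_chunk_tokens : Int) (out : List Int) : Prop := out = token_chunks_alt total_tokens seq_len max_chunk_tokens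
instance (total_tokens : Int) (seq_len : Int) (max_chunk_tokens : Int) (out : List Int) : Decidable (Spec_token_chunks total_tokens seq_len max_chunk_tokens out) := by unfold Spec_token_chunks; infer_instance

-- ===== CLAIM (what is proved, stated in full; the proofs are below) =====
def Claim_equal_token_chunks : Prop := ∀ (total_tokens : Int) (seq_len : Int) (max_chunk_tokens : Int), Dom_token_chunks total_tokens seq_len max_chunk_tokens → Pre_token_chunks total_tokens seq_len max_chunk_tokens → Spec_token_chunks total_tokens seq_len max_chunk_tokens (token_chunks total_tokens seq_len max_chunk_tokens)

-- ===== LEMMAS AND PROOFS =====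

lemma tcLoop_eq (uc : Int) (huc : 0 < uc) (r : Int) (hr : 0 ≤ r) (acc : List Int) :
    tcLoop uc r acc =
      acc ++ List.replicate (r / uc).toNat uc ++ (if r % uc ≠ 0 then [r % uc] else []) := by
  induction hk : r.toNat using Nat.strong_induction_on generalizing r acc with
  | _ n ih =>
  subst hk
  rw [tcLoop]
  by_cases h : 0 < r
  · have hmin : 0 < min r uc := lt_min h huc
    rw [dif_pos ⟨h, hmin⟩]
    rcases le_or_gt r uc with hle | hlt
    · -- chunk = r, next remaining = 0
      rw [min_eq_left hle]
      have h0 : (r - r).toNat < r.toNat := by omega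
      rw [ih _ h0 (r - r) (by omega) _ rfl]
      rcases eq_or_lt_of_le hle with heq | hlt'
      · subst heq
        simp [Int.ediv_self (by omega : r ≠ 0)]
      · have hd : r / uc = 0 := Int.ediv_eq_zero_of_lt (le_of_lt h) hlt'
        have hm : r % uc = r := Int.emod_eq_of_lt (le_of_lt h) hlt'
        simp [hd, hm]
        omega
    · -- chunk = uc
      rw [min_eq_right (le_of_lt hlt)]
      have h0 : (r - uc).toNat < r.toNat := by omega
      rw [ih _ h0 (r - uc) (by omega) _ rfl]
      have hdiv : (r - uc) / uc = r / uc - 1 := by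
        have he : r - uc = r + (-1) * uc := by ring
        rw [he, Int.add_mul_ediv_right _ _ (by omega : uc ≠ 0)]
        ring
      have hmod : (r - uc) % uc = r % uc := by
        conv_lhs => rw [Int.sub_emod, Int.emod_self]
        simp [Int.emod_emod_of_dvd]
      have hone : 1 ≤ r / uc := by
        rw [Int.le_ediv_iff_mul_le huc]; omega
      have hrep : (r / uc).toNat = (r / uc - 1).toNat + 1 := by omega
      rw [hdiv, hmod, hrep, List.replicate_succ]
      simp
  · rw [dif_neg (by tauto)]
    have hr0 : r = 0 := by omega
    subst hr0
    simp

-- ===== VERDICT (by name: the statement is the Claim_ definition above) =====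
theorem token_chunks_spec : Claim_equal_token_chunks := by
  intro t s m _ hpre
  obtain ⟨hs, hut, huc⟩ := hpre
  unfold Spec_token_chunks token_chunks token_chunks_alt
  simp only [if_neg (by omega : ¬ (PySem.Int.floordiv t s) * s ≤ 0)]
  set ut := (PySem.Int.floordiv t s) * s with hutdef
  set uc := max ((PySem.Int.floordiv m s) * s) s with hucdef
  rw [tcLoop_eq uc huc ut (le_of_lt hut) [],
      PySem.Int.floordiv_eq_ediv_of_pos huc, PySem.Int.mod_eq_emod_of_pos huc]
  simp
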